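-- pv_equiv track=rewrite | github.com/jcb960/Memories | src/KdataFunctions.py | allSelectionsFounder
-- ===== SOURCE A (Python) =====
-- def allSelectionsFounder(setShuffled): #Finds all the selections, such as [1, 2, 3, 4] indexes being spades, so [1, 2], [1, 3], [3, 4] etc could be a pair
--     fullSelections=[]
--     for firstCardIndex in range(len(setShuffled)):
--         firstCard=firstCardIndex+1
--         singleSelections=[firstCard]
--
--         for secondCardIndex in range(len(setShuffled)):
--             secondCard=secondCardIndex+1
--
--             if firstCardIndex!=secondCardIndex:
--                 gameCard1=setShuffled[firstCardIndex]
--                 gameCard2=setShuffled[secondCardIndex]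
--
--                 if gameCard1[:-1]==gameCard2[:-1]:
--                     singleSelections.append(secondCard)
--         singleSelections.sort() #Sorted so it can be compared later on and does not get used more than once
--
--         if singleSelections not in fullSelections:
--             fullSelections.append(singleSelections)
--     return fullSelections
-- ===== SOURCE B (Python) =====
-- def allSelectionsFounder(setShuffled):
--     # Bucket 1-based indices by rank prefix (card[:-1]); each bucket is already in
--     # increasing order, and dict insertion order matches A's first-seen dedup order.
--     groups = {}
--     for i, card in enumerate(setShuffled):
--         groups.setdefault(card[:-1], []).append(i + 1)
--     return list(groups.values())
-- ===== Notes on version B (the rewrite author's own statement) =====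
-- stated objective: faster
-- what changed: Replaces A's O(n^2) index-pair scans plus an O(n) dedup membership test per row by a single pass that buckets 1-based indices into a dict keyed by the card's rank prefix (card[:-1]), returning the dict's values in insertion order.
import Mathlib
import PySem

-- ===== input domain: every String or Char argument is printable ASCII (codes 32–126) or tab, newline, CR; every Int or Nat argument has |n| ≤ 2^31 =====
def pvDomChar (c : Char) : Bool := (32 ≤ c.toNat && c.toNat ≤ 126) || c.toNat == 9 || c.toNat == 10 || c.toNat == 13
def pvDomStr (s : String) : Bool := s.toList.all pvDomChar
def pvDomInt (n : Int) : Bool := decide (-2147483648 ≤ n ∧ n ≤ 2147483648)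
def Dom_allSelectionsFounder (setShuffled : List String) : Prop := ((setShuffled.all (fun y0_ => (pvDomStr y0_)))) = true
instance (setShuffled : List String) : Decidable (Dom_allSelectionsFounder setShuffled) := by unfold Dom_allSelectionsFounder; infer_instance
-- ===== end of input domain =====

-- B replaces A's cubic index-scanning loops by one pass bucketing indices by rank-prefix
-- into an insertion-ordered dict (objective: faster, asymptotic).


-- ===== PORT A =====
def allSelectionsFounder (setShuffled : List String) : List (List Int) :=
  (PySem.List.pyRange 0 (PySem.List.len setShuffled) 1).foldl
    (fun fullSelections firstCardIndex =>
      let firstCard := firstCardIndex + 1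
      let singleSelections :=
        (PySem.List.pyRange 0 (PySem.List.len setShuffled) 1).foldl
          (fun ss secondCardIndex =>
            let secondCard := secondCardIndex + 1
            if firstCardIndex ≠ secondCardIndex then
              let gameCard1 := PySem.List.pyGetD setShuffled firstCardIndex ""
              let gameCard2 := PySem.List.pyGetD setShuffled secondCardIndex ""
              if PySem.Str.slice gameCard1 none (some (-1)) = PySem.Str.slice gameCard2 none (some (-1)) then
                ss ++ [secondCard]
              else ss
            else ss)
          [firstCard]
      let singleSelectionsSorted := PySem.List.sorted singleSelections (fun x => x) false
      if singleSelectionsSorted ∈ fullSelections then fullSelections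
      else fullSelections ++ [singleSelectionsSorted])
    []

-- ===== PORT B =====
def allSelectionsFounder_alt (setShuffled : List String) : List (List Int) :=
  let groups : PySem.Dict String (List Int) :=
    (PySem.List.enumerate setShuffled 0).foldl
      (fun d ic =>
        d.modify (PySem.Str.slice ic.2 none (some (-1))) [] (fun g => g ++ [ic.1 + 1]))
      PySem.Dict.empty
  groups.values

-- ===== PRECONDITION & SPEC =====
def Spec_allSelectionsFounder (setShuffled : List String) (out : List (List Int)) : Prop := out = allSelectionsFounder_alt setShuffled
instance (setShuffled : List String) (out : List (List Int)) : Decidable (Spec_allSelectionsFounder setShuffled out) := by unfold Spec_allSelectionsFounder; infer_instance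

-- ===== CLAIM (what is proved, stated in full; the proofs are below) =====
def Claim_equal_allSelectionsFounder : Prop := ∀ (setShuffled : List String), Dom_allSelectionsFounder setShuffled → Spec_allSelectionsFounder setShuffled (allSelectionsFounder setShuffled)

-- ===== LEMMAS AND PROOFS =====

-- card[:-1], the rank prefix both programs group by
def pvPref (s : String) : String := PySem.Str.slice s none (some (-1))

-- the sorted 1-based index group of a prefix p, over the whole input
def pvGroup (l : List String) (p : String) : List Int :=
  ((PySem.List.pyRange 0 (PySem.List.len l) 1).filter
      (fun j => decide (pvPref (PySem.List.pyGetD l j "") = p))).map (fun j => j + 1)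

-- A's inner loop, sorted, computes pvGroup of the prefix at index i
theorem pvInner_eq (l : List String) (i : Int) (hi : i ∈ PySem.List.pyRange 0 (PySem.List.len l) 1) :
    PySem.List.sorted
      ((PySem.List.pyRange 0 (PySem.List.len l) 1).foldl
        (fun ss j =>
          if i ≠ j then
            if PySem.Str.slice (PySem.List.pyGetD l i "") none (some (-1))
                 = PySem.Str.slice (PySem.List.pyGetD l j "") none (some (-1)) then
              ss ++ [j + 1]
            else ss
          else ss)
        [i + 1]) (fun x => x) false
    = pvGroup l (pvPref (PySem.List.pyGetD l i "")) := by
  have hstep : ∀ (acc : List Int), ∀ j ∈ PySem.List.pyRange 0 (PySem.List.len l) 1,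
      (fun ss j =>
        if i ≠ j then
          if PySem.Str.slice (PySem.List.pyGetD l i "") none (some (-1))
               = PySem.Str.slice (PySem.List.pyGetD l j "") none (some (-1)) then
            ss ++ [j + 1]
          else ss
        else ss) acc j
      = (if i ≠ j ∧ pvPref (PySem.List.pyGetD l j "") = pvPref (PySem.List.pyGetD l i "")
         then acc ++ [j + 1] else acc) := by
    intro acc j _
    dsimp only
    by_cases h1 : i = j
    · simp [h1]
    · by_cases h2 : pvPref (PySem.List.pyGetD l j "") = pvPref (PySem.List.pyGetD l i "")
      · simp only [pvPref] at h2
        rw [if_pos h1, if_pos h2.symm, if_pos ⟨h1, by simpa [pvPref] using h2⟩]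
      · simp only [pvPref] at h2
        rw [if_pos h1, if_neg (fun h => h2 h.symm), if_neg (fun h => h2 (by simpa [pvPref] using h.2))]
  rw [PySem.List.foldl_congr_mem _ _ _ _ hstep]
  rw [PySem.List.foldl_append_ite
        (fun j => i ≠ j ∧ pvPref (PySem.List.pyGetD l j "") = pvPref (PySem.List.pyGetD l i ""))
        (fun j : Int => j + 1)]
  have hiR : i ∈ (PySem.List.pyRange 0 (PySem.List.len l) 1).filter
      (fun j => decide (pvPref (PySem.List.pyGetD l j "") = pvPref (PySem.List.pyGetD l i ""))) := by
    simp [List.mem_filter]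
    simpa using (PySem.List.mem_pyRange_one).1 hi
  have hnd : ((PySem.List.pyRange 0 (PySem.List.len l) 1).filter
      (fun j => decide (pvPref (PySem.List.pyGetD l j "") = pvPref (PySem.List.pyGetD l i "")))).Nodup :=
    (PySem.List.nodup_pyRange_one 0 (PySem.List.len l)).filter _
  have h1 := List.perm_cons_erase hiR
  have h2 : ((PySem.List.pyRange 0 (PySem.List.len l) 1).filter
      (fun j => decide (pvPref (PySem.List.pyGetD l j "") = pvPref (PySem.List.pyGetD l i "")))).erase i
      = (PySem.List.pyRange 0 (PySem.List.len l) 1).filter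
        (fun j => decide (i ≠ j ∧ pvPref (PySem.List.pyGetD l j "") = pvPref (PySem.List.pyGetD l i ""))) := by
    rw [hnd.erase_eq_filter, List.filter_filter]
    apply List.filter_congr
    intro j _
    by_cases ha : i = j <;> by_cases hb : pvPref (PySem.List.pyGetD l j "") = pvPref (PySem.List.pyGetD l i "") <;>
      simp [ha, hb]; omega
  rw [h2] at h1
  have hperm : (pvGroup l (pvPref (PySem.List.pyGetD l i ""))).Perm
      ([i + 1] ++ ((PySem.List.pyRange 0 (PySem.List.len l) 1).filter
          (fun j => decide (i ≠ j ∧ pvPref (PySem.List.pyGetD l j "") = pvPref (PySem.List.pyGetD l i "")))).map (fun j => j + 1)) := by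
    unfold pvGroup
    have := h1.map (fun j : Int => j + 1)
    simpa using this
  have hpw : (pvGroup l (pvPref (PySem.List.pyGetD l i ""))).Pairwise
      (fun a b => (fun x : Int => x) a < (fun x : Int => x) b) := by
    unfold pvGroup
    rw [List.pairwise_map]
    exact ((PySem.List.pairwise_lt_pyRange_one 0 (PySem.List.len l)).filter _).imp (fun h => by dsimp only; omega)
  exact PySem.List.sorted_eq_of_perm_of_pairwise_lt _ _ _ hperm hpw

-- first-seen dedup of G-values over ps equals mapping G over the first-seen dedup of ps,
-- when G is injective on the prefixes involved
theorem pvDedup_map (G : String → List Int) :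
    ∀ (ps : List String) (s : PySem.Set String), s.Nodup →
      (∀ p q : String, (p ∈ s ∨ p ∈ ps) → (q ∈ s ∨ q ∈ ps) → G p = G q → p = q) →
      ps.foldl (fun acc p => if G p ∈ acc then acc else acc ++ [G p]) (s.map G)
        = (PySem.Set.update s ps).map G := by
  intro ps
  induction ps with
  | nil => intro s _ _; simp [PySem.Set.update_nil]
  | cons p ps ih =>
    intro s hnd hinj
    rw [List.foldl_cons, PySem.Set.update_cons]
    by_cases hp : p ∈ s
    · have hmem : G p ∈ s.map G := List.mem_map_of_mem hp
      rw [if_pos hmem, PySem.Set.add_of_mem hp]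
      exact ih s hnd (fun a b ha hb => hinj a b
        (ha.imp id (fun h => List.mem_cons_of_mem _ h))
        (hb.imp id (fun h => List.mem_cons_of_mem _ h)))
    · have hmem : G p ∉ s.map G := by
        intro h
        obtain ⟨q, hq, hGq⟩ := List.mem_map.1 h
        exact hp (hinj p q (Or.inr (List.mem_cons_self)) (Or.inl hq) hGq.symm ▸ hq)
      rw [if_neg hmem, PySem.Set.add_of_not_mem hp]
      have hmap : List.map G s ++ [G p] = List.map G (s ++ [p]) := by simp
      rw [hmap]
      have := ih (s ++ [p]) (by simp [List.nodup_append, hnd]; exact fun a ha hap => hp (hap ▸ ha))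
        (fun a b ha hb => hinj a b
          (by rcases ha with h | h
              · rcases List.mem_append.1 h with h | h
                · exact Or.inl h
                · simp at h; subst h; exact Or.inr List.mem_cons_self
              · exact Or.inr (List.mem_cons_of_mem _ h))
          (by rcases hb with h | h
              · rcases List.mem_append.1 h with h | h
                · exact Or.inl h
                · simp at h; subst h; exact Or.inr List.mem_cons_self
              · exact Or.inr (List.mem_cons_of_mem _ h)))
      exact this

-- membership in a group names the prefix: pvGroup is injective on realized prefixes
theorem pvGroup_inj (l : List String) :
    ∀ p q : String, (p ∈ ([] : PySem.Set String) ∨ p ∈ l.map pvPref) →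
      (q ∈ ([] : PySem.Set String) ∨ q ∈ l.map pvPref) →
      pvGroup l p = pvGroup l q → p = q := by
  have hmem : ∀ (p : String) (x : Int), x ∈ pvGroup l p ↔
      ∃ j : Int, (0 ≤ j ∧ j < l.length) ∧ pvPref (PySem.List.pyGetD l j "") = p ∧ x = j + 1 := by
    intro p x
    simp [pvGroup, List.mem_filter, PySem.List.mem_pyRange_one]
    constructor
    · rintro ⟨j, ⟨⟨h1, h2⟩, h3⟩, rfl⟩; exact ⟨j, ⟨h1, h2⟩, h3, rfl⟩
    · rintro ⟨j, ⟨h1, h2⟩, h3, rfl⟩; exact ⟨j, ⟨⟨h1, h2⟩, h3⟩, rfl⟩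
  intro p q hp hq hG
  rcases hp with h | hp; · simp at h
  rcases hq with h | hq; · simp at h
  obtain ⟨s, hs, hsp⟩ := List.mem_map.1 hp
  obtain ⟨k, hk, rfl⟩ := List.mem_iff_getElem.1 hs
  have hget : PySem.List.pyGetD l (k : Int) "" = l[k] := by
    simp [PySem.List.pyGetD_natCast, List.getD_eq_getElem?_getD, hk]
  have hx : ((k : Int) + 1) ∈ pvGroup l p := by
    rw [hmem]
    exact ⟨(k : Int), ⟨by omega, by exact_mod_cast hk⟩, by rw [hget, hsp], rfl⟩
  rw [hG, hmem] at hx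
  obtain ⟨j, ⟨hj0, hj1⟩, hjq, hjx⟩ := hx
  have : j = (k : Int) := by omega
  subst this
  rw [← hjq, hget, hsp]

theorem pvA_eq (l : List String) :
    allSelectionsFounder l = (PySem.Set.ofList (l.map pvPref)).map (pvGroup l) := by
  unfold allSelectionsFounder
  have hstep : ∀ (acc : List (List Int)), ∀ i ∈ PySem.List.pyRange 0 (PySem.List.len l) 1,
      (fun fullSelections firstCardIndex =>
        let firstCard := firstCardIndex + 1
        let singleSelections :=
          (PySem.List.pyRange 0 (PySem.List.len l) 1).foldl
            (fun ss secondCardIndex =>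
              let secondCard := secondCardIndex + 1
              if firstCardIndex ≠ secondCardIndex then
                let gameCard1 := PySem.List.pyGetD l firstCardIndex ""
                let gameCard2 := PySem.List.pyGetD l secondCardIndex ""
                if PySem.Str.slice gameCard1 none (some (-1)) = PySem.Str.slice gameCard2 none (some (-1)) then
                  ss ++ [secondCard]
                else ss
              else ss)
            [firstCard]
        let singleSelectionsSorted := PySem.List.sorted singleSelections (fun x => x) false
        if singleSelectionsSorted ∈ fullSelections then fullSelections
        else fullSelections ++ [singleSelectionsSorted]) acc i
      = (fun acc2 p => if pvGroup l p ∈ acc2 then acc2 else acc2 ++ [pvGroup l p]) acc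
          (pvPref (PySem.List.pyGetD l i "")) := by
    intro acc i hi
    dsimp only
    rw [pvInner_eq l i hi]
  rw [PySem.List.foldl_congr_mem _ _ _ _ hstep]
  rw [show (fun (acc : List (List Int)) (i : Int) =>
        (fun acc2 p => if pvGroup l p ∈ acc2 then acc2 else acc2 ++ [pvGroup l p]) acc
          (pvPref (PySem.List.pyGetD l i "")))
      = (fun acc i => (fun acc2 p => if pvGroup l p ∈ acc2 then acc2 else acc2 ++ [pvGroup l p]) acc
          ((fun i => pvPref (PySem.List.pyGetD l i "")) i)) from rfl]
  rw [← List.foldl_map (f := fun i => pvPref (PySem.List.pyGetD l i ""))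
        (g := fun acc2 p => if pvGroup l p ∈ acc2 then acc2 else acc2 ++ [pvGroup l p])]
  have hmapped : (PySem.List.pyRange 0 (PySem.List.len l) 1).map (fun i => pvPref (PySem.List.pyGetD l i ""))
      = l.map pvPref := by
    rw [show (fun i => pvPref (PySem.List.pyGetD l i "")) = pvPref ∘ (fun i => PySem.List.pyGetD l i "") from rfl,
       ← List.map_map, PySem.List.map_pyGetD_pyRange_zero]
  rw [hmapped]
  have := pvDedup_map (pvGroup l) (l.map pvPref) ([] : PySem.Set String) (by simp)
    (pvGroup_inj l)
  simpa [PySem.Set.update_nil_left] using this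

theorem pvB_eq (l : List String) :
    allSelectionsFounder_alt l = (PySem.Set.ofList (l.map pvPref)).map (pvGroup l) := by
  unfold allSelectionsFounder_alt
  have hpairs :
      (PySem.List.enumerate l 0).foldl
        (fun (d : PySem.Dict String (List Int)) ic =>
          d.modify (PySem.Str.slice ic.2 none (some (-1))) [] (fun g => g ++ [ic.1 + 1]))
        PySem.Dict.empty
      = ((PySem.List.enumerate l 0).map (fun ic => (pvPref ic.2, ic.1 + 1))).foldl
          (fun (d : PySem.Dict String (List Int)) p => d.modify p.1 [] (fun g => g ++ [p.2]))
          PySem.Dict.empty := by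
    rw [List.foldl_map]
    rfl
  rw [hpairs]
  set pairs := (PySem.List.enumerate l 0).map (fun ic : Int × String => (pvPref ic.2, ic.1 + 1)) with hpairsdef
  have hkeys : (pairs.foldl
      (fun (d : PySem.Dict String (List Int)) p => d.modify p.1 [] (fun g => g ++ [p.2]))
      PySem.Dict.empty).keys = PySem.Set.ofList (l.map pvPref) := by
    have := PySem.Dict.keys_foldl_modify_key pairs Prod.fst []
      (fun _ p => (fun g => g ++ [p.2])) PySem.Dict.empty
    rw [this]
    have hfst : pairs.map Prod.fst = l.map pvPref := by
      rw [hpairsdef, List.map_map]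
      have : (Prod.fst ∘ fun ic : Int × String => (pvPref ic.2, ic.1 + 1))
           = (fun ic : Int × String => pvPref ic.2) := rfl
      rw [this, show (fun ic : Int × String => pvPref ic.2) = pvPref ∘ (fun ic : Int × String => ic.2) from rfl,
         ← List.map_map, PySem.List.map_snd_enumerate]
    simp [hfst, PySem.Set.update_nil_left]
  have hnd : (pairs.foldl
      (fun (d : PySem.Dict String (List Int)) p => d.modify p.1 [] (fun g => g ++ [p.2]))
      PySem.Dict.empty).keys.Nodup := by
    have := PySem.Dict.nodup_keys_foldl_modify_key pairs Prod.fst []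
      (fun _ p => (fun g => g ++ [p.2])) PySem.Dict.empty (by simp [PySem.Dict.keys_empty])
    exact this
  rw [PySem.Dict.values_eq_map_keys _ hnd []]
  rw [hkeys]
  apply List.map_congr_left
  intro p _
  rw [PySem.Dict.getD_foldl_modify_append pairs PySem.Dict.empty p]
  have hdempty : (PySem.Dict.empty : PySem.Dict String (List Int)).getD p [] = [] := by
    simp [PySem.Dict.getD_empty]
  rw [hdempty, List.nil_append]
  rw [hpairsdef, PySem.List.enumerate_eq_map_pyRange l "", List.map_map, List.filter_map, List.map_map]
  unfold pvGroup
  have hfc : ∀ j ∈ PySem.List.pyRange 0 (PySem.List.len l) 1,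
      (((fun q : String × Int => q.1 == p) ∘ ((fun ic : Int × String => (pvPref ic.2, ic.1 + 1)) ∘ (fun j => (j, PySem.List.pyGetD l j "")))) j)
        = decide (pvPref (PySem.List.pyGetD l j "") = p) := by
    intro j _
    by_cases h : pvPref (PySem.List.pyGetD l j "") = p <;> simp [h]
  rw [List.filter_congr hfc]
  rfl

-- ===== VERDICT (by name: the statement is the Claim_ definition above) =====
theorem allSelectionsFounder_spec : Claim_equal_allSelectionsFounder := by
  intro l _
  unfold Spec_allSelectionsFounder
  rw [pvA_eq, pvB_eq]
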